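-- pv_equiv track=rewrite | github.com/lgcns5g/LGCNS-5G-AI-RAN-PLATFORM | cmake/helpers/copyright_utils.py | remove_leading_comment_block
-- ===== SOURCE A (Python) =====
-- def _is_copyright_line(line: str) -> bool:
--     """Check if a line contains copyright/license keywords."""
--     line_lower = line.lower()
--     copyright_keywords = [
--         "copyright",
--         "spdx-",
--         "all rights reserved",
--         "proprietary",
--         "license agreement",
--         "licensed under",
--         "strictly prohibited",
--     ]
--     return any(kw in line_lower for kw in copyright_keywords)
--
-- def _find_documentation_boundary(
--     lines: list[str], blank_line_idx: int, comment_char: str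
-- ) -> tuple[int, bool]:
--     """
--     Look ahead from blank separator to find documentation boundary.
--
--     Returns
--     -------
--         Tuple of (end_line_index, found_documentation_flag)
--     """
--     for j in range(blank_line_idx + 1, len(lines)):
--         next_stripped = lines[j].lstrip()
--
--         # Skip additional blank comment lines (we want TRUE blank lines, not '#')
--         if next_stripped in (comment_char, comment_char + " "):
--             continue
--
--         if next_stripped and next_stripped.startswith(comment_char):
--             # Check if this is documentation (no copyright keywords)
--             if not _is_copyright_line(next_stripped):
--                 # Found documentation - preserve from here (j is actual doc line index)
--                 return j, True
--             # Found another copyright block - continue removing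
--             return 0, False
--         if next_stripped:
--             # Non-comment line found
--             return j, False
--     return 0, False
--
-- def remove_leading_comment_block(content: str) -> str:
--     """Remove leading comment blocks (old copyright headers), recursively if multiple exist."""
--     content = content.lstrip()
--
--     # C-style block comment
--     if content.startswith("/*"):
--         end_idx = content.find("*/")
--         if end_idx != -1:
--             remaining = content[end_idx + 2 :].lstrip()
--             if remaining.startswith(("/*", "//", "#")):
--                 return remove_leading_comment_block(remaining)
--             return remaining
--
--     # Line comments (// or #) - ENHANCED with blank-line boundary detection
--     if content.startswith(("//", "#")):
--         lines = content.split("\n")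
--         comment_char = "//" if content.startswith("//") else "#"
--
--         end_line = 0
--         found_documentation = False
--
--         for i, line in enumerate(lines):
--             stripped = line.lstrip()
--
--             # Non-comment line: end of all comments
--             if not stripped.startswith(comment_char) and stripped:
--                 end_line = i
--                 break
--
--             # Blank comment line: check if it separates copyright from documentation
--             if stripped in (comment_char, comment_char + " "):
--                 end_line, found_documentation = _find_documentation_boundary(lines, i, comment_char)
--                 if end_line > 0:
--                     break
--
--         # If end_line is still 0, file contains only copyright comments - remove all
--         if end_line == 0:
--             end_line = len(lines)
--
--         remaining = "\n".join(lines[end_line:]).lstrip()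
--         # Only recurse if we didn't find documentation (might be another copyright block)
--         if not found_documentation and remaining.startswith(("/*", "//", "#")):
--             return remove_leading_comment_block(remaining)
--         return remaining
--
--     return content
-- ===== SOURCE B (Python) =====
-- def _is_copyright_line(line: str) -> bool:
--     """Check if a line contains copyright/license keywords."""
--     line_lower = line.lower()
--     copyright_keywords = [
--         "copyright",
--         "spdx-",
--         "all rights reserved",
--         "proprietary",
--         "license agreement",
--         "licensed under",
--         "strictly prohibited",
--     ]
--     return any(kw in line_lower for kw in copyright_keywords)
--
--
-- def _classify(line: str, cc: str) -> str:
--     """Stage 1: label one line as empty / blank comment / copyright comment /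
--     documentation comment / other."""
--     s = line.lstrip()
--     if not s:
--         return "empty"
--     if s in (cc, cc + " "):
--         return "blank"
--     if s.startswith(cc):
--         return "copy" if _is_copyright_line(s) else "doc"
--     return "other"
--
--
-- def _scan(kinds: list[str]) -> tuple[int, bool]:
--     """Stage 2: one pass over the labels with a pending-blank-separator flag;
--     returns (first line index to keep, documentation-found flag)."""
--     pending = False
--     for i, k in enumerate(kinds):
--         if k == "other":
--             return i, False
--         if k == "blank":
--             pending = True
--         elif k == "doc" and pending:
--             return i, True
--         elif k == "copy":
--             pending = False
--     return len(kinds), False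
--
--
-- def remove_leading_comment_block(content: str) -> str:
--     """Iterative version: a while loop strips one leading comment block per pass;
--     the line-comment boundary is found by first labelling every line and then
--     scanning the labels once (no nested look-ahead helper, no recursion)."""
--     while True:
--         content = content.lstrip()
--
--         if content.startswith("/*") and content.find("*/") != -1:
--             remaining = content[content.find("*/") + 2:].lstrip()
--             if any(remaining.startswith(p) for p in ("/*", "//", "#")):
--                 content = remaining
--                 continue
--             return remaining
--
--         if content.startswith(("//", "#")):
--             lines = content.split("\n")
--             cc = "//" if content.startswith("//") else "#"
--             end_line, found_doc = _scan([_classify(l, cc) for l in lines])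
--             remaining = "\n".join(lines[end_line:]).lstrip()
--             if not found_doc and any(remaining.startswith(p) for p in ("/*", "//", "#")):
--                 content = remaining
--                 continue
--             return remaining
--
--         return content
-- ===== Notes on version B (the rewrite author's own statement) =====
-- stated objective: alternative
-- what changed: Recursion becomes a while-loop iterating a step function, and the nested _find_documentation_boundary look-ahead that A re-runs after every blank comment line is replaced by two staged passes: classify every line into a label, then scan the labels once with a pending-blank flag.
import Mathlib
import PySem

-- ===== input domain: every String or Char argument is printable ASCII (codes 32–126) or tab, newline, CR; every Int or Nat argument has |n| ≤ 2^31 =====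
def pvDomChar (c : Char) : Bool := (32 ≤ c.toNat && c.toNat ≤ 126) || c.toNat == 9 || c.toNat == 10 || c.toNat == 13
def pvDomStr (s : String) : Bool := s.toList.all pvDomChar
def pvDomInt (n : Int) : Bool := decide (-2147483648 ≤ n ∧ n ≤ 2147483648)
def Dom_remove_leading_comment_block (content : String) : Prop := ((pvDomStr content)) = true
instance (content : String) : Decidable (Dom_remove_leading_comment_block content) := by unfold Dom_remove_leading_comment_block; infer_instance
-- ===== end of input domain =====

-- B replaces A's recursion by a while-loop (a step function iterated with fuel) and A's
-- nested look-ahead helper by two staged passes: label every line, then scan the labels once.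

-- ===== PORT A =====
-- _is_copyright_line (same helper in Source A and Source B)
def pvIsCopyrightLine (line : List Char) : Bool :=
  let low := PySem.Chars.lower line
  ["copyright".toList, "spdx-".toList, "all rights reserved".toList, "proprietary".toList,
   "license agreement".toList, "licensed under".toList, "strictly prohibited".toList].any
    (fun kw => PySem.Chars.isIn kw low)

-- A's remaining.startswith(("/*", "//", "#")) tuple test
def pvStartsComment (s : List Char) : Bool :=
  PySem.Chars.startswith s ['/', '*'] || PySem.Chars.startswith s ['/', '/'] ||
    PySem.Chars.startswith s ['#']

-- _find_documentation_boundary: the for-j loop over lines[blank_line_idx+1:], carried as the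
-- suffix list with j the running index
def pvFindBoundary (cc : List Char) : Nat → List (List Char) → Nat × Bool
  | _, [] => (0, false)
  | j, l :: rest =>
    let ns := PySem.Chars.lstrip l
    if ns = cc ∨ ns = cc ++ [' '] then pvFindBoundary cc (j + 1) rest
    else if ns ≠ [] ∧ PySem.Chars.startswith ns cc = true then
      (if pvIsCopyrightLine ns = true then (0, false) else (j, true))
    else if ns ≠ [] then (j, false)
    else pvFindBoundary cc (j + 1) rest

-- A's for-i loop: returns (end_line, found_documentation); falling off the loop leaves (0, false)
def pvScanA (cc : List Char) : Nat → List (List Char) → Nat × Bool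
  | _, [] => (0, false)
  | i, l :: rest =>
    let s := PySem.Chars.lstrip l
    if ¬ PySem.Chars.startswith s cc = true ∧ s ≠ [] then (i, false)
    else if s = cc ∨ s = cc ++ [' '] then
      let r := pvFindBoundary cc (i + 1) rest
      if 0 < r.1 then r else pvScanA cc (i + 1) rest
    else pvScanA cc (i + 1) rest

-- A's recursion, made total with fuel (content length strictly decreases, so the fuel
-- supplied by the wrapper is never exhausted)
def pvRemoveA : Nat → List Char → List Char
  | 0, c => c
  | fuel + 1, c0 =>
    let c := PySem.Chars.lstrip c0
    if PySem.Chars.startswith c ['/', '*'] = true ∧ PySem.Chars.find c ['*', '/'] ≠ -1 then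
      let remaining :=
        PySem.Chars.lstrip (PySem.List.slice c (some (PySem.Chars.find c ['*', '/'] + 2)) none)
      if pvStartsComment remaining = true then pvRemoveA fuel remaining else remaining
    else if PySem.Chars.startswith c ['/', '/'] = true ∨ PySem.Chars.startswith c ['#'] = true then
      let lines := PySem.Chars.splitOn c ['\n']
      let cc := if PySem.Chars.startswith c ['/', '/'] = true then ['/', '/'] else ['#']
      let r := pvScanA cc 0 lines
      let endLine := if r.1 = 0 then lines.length else r.1
      let remaining := PySem.Chars.lstrip (PySem.Chars.join ['\n'] (lines.drop endLine))
      if ¬ r.2 = true ∧ pvStartsComment remaining = true then pvRemoveA fuel remaining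
      else remaining
    else c

def remove_leading_comment_block (content : String) : String :=
  String.ofList (pvRemoveA (content.toList.length + 1) content.toList)

-- ===== PORT B =====
-- _classify: the label of one line
inductive PvKind : Type
  | empty | blank | copy | doc | other
deriving DecidableEq, Repr

def pvClassify (cc l : List Char) : PvKind :=
  let s := PySem.Chars.lstrip l
  if s = [] then .empty
  else if s = cc ∨ s = cc ++ [' '] then .blank
  else if PySem.Chars.startswith s cc = true then
    (if pvIsCopyrightLine s = true then .copy else .doc)
  else .other

-- _scan: one pass over the labels with the pending flag; i is the enumerate counter,
-- so falling off the list returns (len(kinds), False)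
def pvScanKinds : Nat → Bool → List PvKind → Nat × Bool
  | i, _, [] => (i, false)
  | i, pending, k :: rest =>
    match k with
    | .other => (i, false)
    | .blank => pvScanKinds (i + 1) true rest
    | .doc => if pending then (i, true) else pvScanKinds (i + 1) pending rest
    | .copy => pvScanKinds (i + 1) false rest
    | .empty => pvScanKinds (i + 1) pending rest

-- B's any(remaining.startswith(p) for p in ("/*", "//", "#"))
def pvAnyComment (s : List Char) : Bool :=
  [['/', '*'], ['/', '/'], ['#']].any (fun p => PySem.Chars.startswith s p)

-- one pass of B's while-True body: .inl = 'content = …; continue', .inr = 'return …'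
def pvStepB (c0 : List Char) : List Char ⊕ List Char :=
  let c := PySem.Chars.lstrip c0
  if PySem.Chars.startswith c ['/', '*'] = true ∧ PySem.Chars.find c ['*', '/'] ≠ -1 then
    let remaining :=
      PySem.Chars.lstrip (PySem.List.slice c (some (PySem.Chars.find c ['*', '/'] + 2)) none)
    if pvAnyComment remaining = true then .inl remaining else .inr remaining
  else if PySem.Chars.startswith c ['/', '/'] = true ∨ PySem.Chars.startswith c ['#'] = true then
    let lines := PySem.Chars.splitOn c ['\n']
    let cc := if PySem.Chars.startswith c ['/', '/'] = true then ['/', '/'] else ['#']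
    let r := pvScanKinds 0 false (lines.map (pvClassify cc))
    let remaining := PySem.Chars.lstrip (PySem.Chars.join ['\n'] (lines.drop r.1))
    if ¬ r.2 = true ∧ pvAnyComment remaining = true then .inl remaining else .inr remaining
  else .inr c

-- the while-True loop, iterated with the same fuel scheme
def pvLoopB : Nat → List Char → List Char
  | 0, c => c
  | fuel + 1, c =>
    match pvStepB c with
    | .inl c' => pvLoopB fuel c'
    | .inr r => r

def remove_leading_comment_block_alt (content : String) : String :=
  String.ofList (pvLoopB (content.toList.length + 1) content.toList)

-- ===== PRECONDITION & SPEC =====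
def Spec_remove_leading_comment_block (content : String) (out : String) : Prop := out = remove_leading_comment_block_alt content
instance (content : String) (out : String) : Decidable (Spec_remove_leading_comment_block content out) := by unfold Spec_remove_leading_comment_block; infer_instance

-- ===== CLAIM (what is proved, stated in full; the proofs are below) =====
def Claim_equal_remove_leading_comment_block : Prop := ∀ (content : String), Dom_remove_leading_comment_block content → Spec_remove_leading_comment_block content (remove_leading_comment_block content)

-- ===== LEMMAS AND PROOFS =====

def pvPost (n : Nat) (r : Nat × Bool) : Nat × Bool := (if r.1 = 0 then n else r.1, r.2)

lemma pv_anyComment_eq (s : List Char) : pvAnyComment s = pvStartsComment s := by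
  simp [pvAnyComment, pvStartsComment, Bool.or_assoc]

lemma pv_blank_startswith {s cc : List Char} (h : s = cc ∨ s = cc ++ [' ']) :
    PySem.Chars.startswith s cc = true := by
  rw [PySem.Chars.startswith_iff]
  rcases h with h | h <;> subst h <;> simp

lemma pv_startswith_ne_nil {s cc : List Char} (hcc : cc ≠ []) (h : PySem.Chars.startswith s cc = true) :
    s ≠ [] := by
  rw [PySem.Chars.startswith_iff] at h
  rintro rfl
  exact hcc (List.prefix_nil.mp h)

lemma pv_scan_rel (cc : List Char) (hcc : cc ≠ []) (rest : List (List Char)) :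
    ∀ i : Nat, 1 ≤ i →
      pvScanKinds i false (rest.map (pvClassify cc)) =
        pvPost (i + rest.length) (pvScanA cc i rest) ∧
      pvScanKinds i true (rest.map (pvClassify cc)) =
        pvPost (i + rest.length)
          (if 0 < (pvFindBoundary cc i rest).1 then pvFindBoundary cc i rest
           else pvScanA cc i rest) := by
  induction rest with
  | nil =>
    intro i hi
    have : i ≠ 0 := by omega
    simp [pvScanA, pvScanKinds, pvFindBoundary, pvPost]
  | cons l rest ih =>
    intro i hi
    have hi1 : 1 ≤ i + 1 := by omega
    have hipos : i ≠ 0 := by omega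
    have hlen : i + (l :: rest).length = (i + 1) + rest.length := by simp; omega
    by_cases hemp : PySem.Chars.lstrip l = []
    · -- truly blank line: skipped everywhere, pending preserved
      have hk : pvClassify cc l = .empty := by simp [pvClassify, hemp]
      constructor
      · simp only [List.map, hk, pvScanKinds, pvScanA]
        rw [(ih (i + 1) hi1).1, hlen]
        simp [hemp, hcc]
      · simp only [List.map, hk, pvScanKinds, pvScanA, pvFindBoundary]
        rw [(ih (i + 1) hi1).2, hlen]
        by_cases h0 : 0 < (pvFindBoundary cc (i + 1) rest).1 <;>
          simp [hemp, hcc, h0]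
    · by_cases hblank : PySem.Chars.lstrip l = cc ∨ PySem.Chars.lstrip l = cc ++ [' ']
      · -- blank comment separator line
        have hst := pv_blank_startswith hblank
        have hk : pvClassify cc l = .blank := by simp [pvClassify, hemp, hblank]
        constructor
        · simp only [List.map, hk, pvScanKinds, pvScanA]
          rw [(ih (i + 1) hi1).2, hlen]
          by_cases h0 : 0 < (pvFindBoundary cc (i + 1) rest).1 <;>
            simp [hblank, hst, hemp, h0]
        · simp only [List.map, hk, pvScanKinds, pvScanA, pvFindBoundary]
          rw [(ih (i + 1) hi1).2, hlen]
          by_cases h0 : 0 < (pvFindBoundary cc (i + 1) rest).1 <;>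
            simp [hblank, hst, hemp, h0]
      · by_cases hst : PySem.Chars.startswith (PySem.Chars.lstrip l) cc = true
        · -- substantial comment line
          by_cases hcopy : pvIsCopyrightLine (PySem.Chars.lstrip l) = true
          · have hk : pvClassify cc l = .copy := by
              simp [pvClassify, hemp, hblank, hst, hcopy]
            constructor
            · simp only [List.map, hk, pvScanKinds, pvScanA]
              rw [(ih (i + 1) hi1).1, hlen]
              simp [hblank, hst, hemp]
            · simp only [List.map, hk, pvScanKinds, pvScanA, pvFindBoundary]
              rw [(ih (i + 1) hi1).1, hlen]
              simp [hblank, hst, hemp, hcopy]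
          · have hk : pvClassify cc l = .doc := by
              simp [pvClassify, hemp, hblank, hst, hcopy]
            constructor
            · simp only [List.map, hk, pvScanKinds, pvScanA]
              rw [(ih (i + 1) hi1).1, hlen]
              simp [hblank, hst, hemp]
            · simp only [List.map, hk, pvScanKinds, pvFindBoundary]
              simp [hblank, hst, hemp, hcopy, pvPost, hipos, Nat.pos_of_ne_zero hipos]
        · -- non-comment, non-empty line: ends the block at i
          have hk : pvClassify cc l = .other := by
            simp [pvClassify, hemp, hblank, hst]
          constructor
          · simp only [List.map, hk, pvScanKinds, pvScanA]
            simp [hst, hemp, pvPost, hipos]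
          · simp only [List.map, hk, pvScanKinds, pvFindBoundary]
            simp [hblank, hst, hemp, pvPost, hipos, Nat.pos_of_ne_zero hipos]

lemma pv_scan_head (cc : List Char) (hcc : cc ≠ []) (l : List Char)
    (rest : List (List Char)) (hst : PySem.Chars.startswith (PySem.Chars.lstrip l) cc = true) :
    pvScanKinds 0 false ((l :: rest).map (pvClassify cc)) =
      pvPost (l :: rest).length (pvScanA cc 0 (l :: rest)) := by
  have hne := pv_startswith_ne_nil hcc hst
  have hlen : (l :: rest).length = 1 + rest.length := by simp; omega
  by_cases hblank : PySem.Chars.lstrip l = cc ∨ PySem.Chars.lstrip l = cc ++ [' ']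
  · have hk : pvClassify cc l = .blank := by simp [pvClassify, hne, hblank]
    simp only [List.map, hk, pvScanKinds, pvScanA]
    rw [(pv_scan_rel cc hcc rest 1 (by omega)).2, hlen]
    by_cases h0 : 0 < (pvFindBoundary cc 1 rest).1 <;> simp [hblank, hst, hne, h0]
  · by_cases hcopy : pvIsCopyrightLine (PySem.Chars.lstrip l) = true
    · have hk : pvClassify cc l = .copy := by simp [pvClassify, hne, hblank, hst, hcopy]
      simp only [List.map, hk, pvScanKinds, pvScanA]
      rw [(pv_scan_rel cc hcc rest 1 (by omega)).1, hlen]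
      simp [hblank, hst, hne]
    · have hk : pvClassify cc l = .doc := by simp [pvClassify, hne, hblank, hst, hcopy]
      simp only [List.map, hk, pvScanKinds, pvScanA]
      rw [(pv_scan_rel cc hcc rest 1 (by omega)).1, hlen]
      simp [hblank, hst, hne]

lemma pv_go_acc (sep : List Char) :
    ∀ (fuel : Nat) (l cur : List Char) (acc : List (List Char)),
      PySem.Chars.splitOn.go sep fuel l cur acc =
        acc.reverse ++ PySem.Chars.splitOn.go sep fuel l cur [] := by
  intro fuel
  induction fuel with
  | zero => intro l cur acc; simp [PySem.Chars.splitOn.go]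
  | succ fuel ih =>
    intro l cur acc
    cases l with
    | nil => simp [PySem.Chars.splitOn.go]
    | cons c restl =>
      simp only [PySem.Chars.splitOn.go]
      by_cases hp : sep.isPrefixOf (c :: restl) = true
      · simp only [if_pos hp]
        rw [ih _ _ (cur.reverse :: acc), ih _ _ ([cur.reverse])]
        simp
      · simp only [if_neg hp]
        exact ih _ _ acc

lemma pv_go_head (sep : List Char) :
    ∀ (fuel : Nat) (l cur : List Char),
      ∃ u t, PySem.Chars.splitOn.go sep fuel l cur [] = (cur.reverse ++ u) :: t := by
  intro fuel
  induction fuel with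
  | zero => intro l cur; exact ⟨l, [], by simp [PySem.Chars.splitOn.go]⟩
  | succ fuel ih =>
    intro l cur
    cases l with
    | nil => exact ⟨[], [], by simp [PySem.Chars.splitOn.go]⟩
    | cons c restl =>
      by_cases hp : sep.isPrefixOf (c :: restl) = true
      · refine ⟨[], PySem.Chars.splitOn.go sep fuel (List.drop sep.length (c :: restl)) [] [], ?_⟩
        simp only [PySem.Chars.splitOn.go, if_pos hp]
        rw [pv_go_acc]
        simp
      · obtain ⟨u, t, h⟩ := ih restl (c :: cur)
        refine ⟨c :: u, t, ?_⟩
        simp only [PySem.Chars.splitOn.go, if_neg hp]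
        rw [h]
        simp

lemma pv_go_head_prefix :
    ∀ (cc : List Char), (∀ ch ∈ cc, ch ≠ '\n') →
      ∀ (fuel : Nat) (t cur : List Char), cc.length ≤ fuel →
        ∃ u tl, PySem.Chars.splitOn.go ['\n'] fuel (cc ++ t) cur [] = (cur.reverse ++ cc ++ u) :: tl := by
  intro cc
  induction cc with
  | nil =>
    intro _ fuel t cur _
    obtain ⟨u, tl, h⟩ := pv_go_head ['\n'] fuel t cur
    exact ⟨u, tl, by simpa using h⟩
  | cons ch cc ih =>
    intro hnl fuel t cur hfuel
    cases fuel with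
    | zero => rw [List.length_cons] at hfuel; omega
    | succ fuel =>
      have hch : ch ≠ '\n' := hnl ch (by simp)
      have hp : (['\n'] : List Char).isPrefixOf (ch :: (cc ++ t)) = false := by
        have hb : (('\n' : Char) == ch) = false := beq_eq_false_iff_ne.mpr (Ne.symm hch)
        simp [List.isPrefixOf, hb]
      obtain ⟨u, tl, h⟩ := ih (fun c hc => hnl c (by simp [hc])) fuel t (ch :: cur) (by simpa using Nat.le_of_succ_le_succ hfuel)
      refine ⟨u, tl, ?_⟩
      simp only [List.cons_append, PySem.Chars.splitOn.go, hp, Bool.false_eq_true, if_false]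
      rw [h]
      simp

lemma pv_splitOn_head (c cc : List Char) (hnl : ∀ ch ∈ cc, ch ≠ '\n')
    (hst : PySem.Chars.startswith c cc = true) :
    ∃ u tl, PySem.Chars.splitOn c ['\n'] = (cc ++ u) :: tl := by
  rw [PySem.Chars.startswith_iff] at hst
  obtain ⟨t, rfl⟩ := hst
  obtain ⟨u, tl, h⟩ := pv_go_head_prefix cc hnl ((cc ++ t).length + 1) t []
    (by simp; omega)
  exact ⟨u, tl, by simpa [PySem.Chars.splitOn] using h⟩

lemma pv_lstrip_startswith_head {cc u : List Char} (hcc : cc ≠ [])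
    (hns : ∀ ch, cc.headI = ch → PySem.Chars.isspace ch = false) :
    PySem.Chars.startswith (PySem.Chars.lstrip (cc ++ u)) cc = true := by
  cases cc with
  | nil => exact absurd rfl hcc
  | cons ch cct =>
    have : PySem.Chars.lstrip ((ch :: cct) ++ u) = (ch :: cct) ++ u := by
      simp [PySem.Chars.lstrip, hns ch rfl]
    rw [this, PySem.Chars.startswith_iff]
    exact List.prefix_append _ _

set_option maxRecDepth 4096 in
lemma pv_remove_eq : ∀ (fuel : Nat) (c : List Char), pvRemoveA fuel c = pvLoopB fuel c := by
  intro fuel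
  induction fuel with
  | zero => intro c; rfl
  | succ fuel ih =>
    intro c0
    simp only [pvRemoveA, pvLoopB, pvStepB]
    by_cases h1 : PySem.Chars.startswith (PySem.Chars.lstrip c0) ['/', '*'] = true ∧
        PySem.Chars.find (PySem.Chars.lstrip c0) ['*', '/'] ≠ -1
    · simp only [if_pos h1, pv_anyComment_eq]
      split <;> simp [ih]
    · simp only [if_neg h1]
      by_cases h2 : PySem.Chars.startswith (PySem.Chars.lstrip c0) ['/', '/'] = true ∨
          PySem.Chars.startswith (PySem.Chars.lstrip c0) ['#'] = true
      · simp only [if_pos h2, pv_anyComment_eq]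
        -- the chosen comment char; the (lstripped) content starts with it
        have key : ∀ cc : List Char, cc ≠ [] → (∀ ch ∈ cc, ch ≠ '\n') →
            (∀ ch, cc.headI = ch → PySem.Chars.isspace ch = false) →
            PySem.Chars.startswith (PySem.Chars.lstrip c0) cc = true →
            pvScanKinds 0 false ((PySem.Chars.splitOn (PySem.Chars.lstrip c0) ['\n']).map (pvClassify cc)) =
              pvPost (PySem.Chars.splitOn (PySem.Chars.lstrip c0) ['\n']).length
                (pvScanA cc 0 (PySem.Chars.splitOn (PySem.Chars.lstrip c0) ['\n'])) := by
          intro cc hcc hnl hns hst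
          obtain ⟨u, tl, hsplit⟩ := pv_splitOn_head _ cc hnl hst
          rw [hsplit]
          exact pv_scan_head cc hcc _ tl
            (by simpa [hsplit] using pv_lstrip_startswith_head hcc hns (u := u))
        by_cases h3 : PySem.Chars.startswith (PySem.Chars.lstrip c0) ['/', '/'] = true
        · simp only [if_pos h3]
          rw [key ['/', '/'] (by simp) (by simp) (by intro ch h; rw [← h]; decide) h3]
          simp only [pvPost]
          split <;> simp_all <;> split <;> simp_all
        · simp only [if_neg h3]
          have h4 : PySem.Chars.startswith (PySem.Chars.lstrip c0) ['#'] = true := by tauto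
          rw [key ['#'] (by simp) (by simp) (by intro ch h; rw [← h]; decide) h4]
          simp only [pvPost]
          split <;> simp_all <;> split <;> simp_all
      · simp only [if_neg h2]

-- ===== VERDICT (by name: the statement is the Claim_ definition above) =====
theorem remove_leading_comment_block_spec : Claim_equal_remove_leading_comment_block := by
  intro content _
  show remove_leading_comment_block content = remove_leading_comment_block_alt content
  unfold remove_leading_comment_block remove_leading_comment_block_alt
  rw [pv_remove_eq]
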